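-- pv_equiv track=rewrite | github.com/AgentArchitectAI/starter-function | src/agent_zero_helpers.py | _extract_special_requirements
-- ===== SOURCE A (Python) =====
-- from typing import Dict, List, Tuple, Optional, Any, Union
--
-- def _extract_special_requirements(text: str) -> List[str]:
--     """Extract special requirements from text."""
--     special_reqs = []
--
--     # Common special requirements
--     if any(word in text.lower() for word in ["accessible", "wheelchair", "disability"]):
--         special_reqs.append("accessibility_compliant")
--
--     if any(word in text.lower() for word in ["professional", "chef", "commercial"]):
--         special_reqs.append("professional_grade")
--
--     if any(word in text.lower() for word in ["entertaining", "party", "guests"]):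
--         special_reqs.append("entertainment_focused")
--
--     return special_reqs
-- ===== SOURCE B (Python) =====
-- KEYWORDS = {
--     "accessible": "accessibility_compliant",
--     "wheelchair": "accessibility_compliant",
--     "disability": "accessibility_compliant",
--     "professional": "professional_grade",
--     "chef": "professional_grade",
--     "commercial": "professional_grade",
--     "entertaining": "entertainment_focused",
--     "party": "entertainment_focused",
--     "guests": "entertainment_focused",
-- }
-- TAG_ORDER = ["accessibility_compliant", "professional_grade", "entertainment_focused"]
--
-- def _extract_special_requirements(text):
--     """Single left-to-right scan: at each position, try every keyword with
--     startswith; collect the matched tags in a set, then emit them in the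
--     canonical tag order."""
--     low = text.lower()
--     found = set()
--     for i in range(len(low)):
--         for kw, tag in KEYWORDS.items():
--             if low.startswith(kw, i):
--                 found.add(tag)
--     return [t for t in TAG_ORDER if t in found]
-- ===== Notes on version B (the rewrite author's own statement) =====
-- stated objective: alternative
-- what changed: Replaces the three per-rule substring-membership tests with a single left-to-right scan over text positions that multi-pattern-matches all nine keywords via startswith, accumulating matched tags in a set and emitting them in canonical tag order.
import Mathlib
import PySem

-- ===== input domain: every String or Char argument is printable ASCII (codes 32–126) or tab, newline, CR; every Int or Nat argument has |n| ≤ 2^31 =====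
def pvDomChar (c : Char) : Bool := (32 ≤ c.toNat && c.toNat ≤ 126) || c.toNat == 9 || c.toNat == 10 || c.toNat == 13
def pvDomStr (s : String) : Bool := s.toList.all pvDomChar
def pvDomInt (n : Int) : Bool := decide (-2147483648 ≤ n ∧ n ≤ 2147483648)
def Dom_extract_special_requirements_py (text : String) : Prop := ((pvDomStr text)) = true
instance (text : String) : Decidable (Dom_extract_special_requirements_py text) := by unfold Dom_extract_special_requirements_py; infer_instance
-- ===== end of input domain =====

-- B replaces A's three per-rule substring tests with one left-to-right scan over text
-- positions, matching all nine keywords by startswith into a set and emitting the tags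
-- in canonical order (alternative algorithm; same output).

-- ===== PORT A =====
def extract_special_requirements_py (text : String) : List String :=
  let special_reqs : List String := []
  let special_reqs :=
    if ["accessible", "wheelchair", "disability"].any
        (fun word => PySem.Str.isIn word (PySem.Str.lower text)) then
      special_reqs ++ ["accessibility_compliant"] else special_reqs
  let special_reqs :=
    if ["professional", "chef", "commercial"].any
        (fun word => PySem.Str.isIn word (PySem.Str.lower text)) then
      special_reqs ++ ["professional_grade"] else special_reqs
  let special_reqs :=
    if ["entertaining", "party", "guests"].any
        (fun word => PySem.Str.isIn word (PySem.Str.lower text)) then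
      special_reqs ++ ["entertainment_focused"] else special_reqs
  special_reqs

-- ===== PORT B =====
-- the KEYWORDS dict of Source B, iterated in insertion order
def pvKeywords : List (List Char × String) :=
  [("accessible".toList, "accessibility_compliant"),
   ("wheelchair".toList, "accessibility_compliant"),
   ("disability".toList, "accessibility_compliant"),
   ("professional".toList, "professional_grade"),
   ("chef".toList, "professional_grade"),
   ("commercial".toList, "professional_grade"),
   ("entertaining".toList, "entertainment_focused"),
   ("party".toList, "entertainment_focused"),
   ("guests".toList, "entertainment_focused")]

def pvTagOrder : List String :=
  ["accessibility_compliant", "professional_grade", "entertainment_focused"]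

-- body of the inner 'for kw, tag in KEYWORDS.items()' loop at position i;
-- low.startswith(kw, i) with 0 ≤ i is exactly kw.isPrefixOf (low.drop i)
def pvScanPos (low : List Char) (acc : PySem.Set String) (i : Nat) : PySem.Set String :=
  pvKeywords.foldl
    (fun acc kv => if kv.1.isPrefixOf (low.drop i) then PySem.Set.add acc kv.2 else acc) acc

def extract_special_requirements_py_alt (text : String) : List String :=
  let low := (PySem.Str.lower text).toList
  let found := (List.range low.length).foldl (pvScanPos low) PySem.Set.empty
  pvTagOrder.filter (fun t => PySem.Set.contains found t)

-- ===== PRECONDITION & SPEC =====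
def Spec_extract_special_requirements_py (text : String) (out : List String) : Prop := out = extract_special_requirements_py_alt text
instance (text : String) (out : List String) : Decidable (Spec_extract_special_requirements_py text out) := by unfold Spec_extract_special_requirements_py; infer_instance

-- ===== CLAIM =====
def Claim_equal_extract_special_requirements_py : Prop := ∀ (text : String), Dom_extract_special_requirements_py text → Spec_extract_special_requirements_py text (extract_special_requirements_py text)

-- ===== LEMMAS AND PROOFS =====

-- membership after the inner keyword loop at one position
theorem pv_mem_scanPos (low : List Char) (acc : PySem.Set String) (i : Nat) (t : String) :
    t ∈ pvScanPos low acc i ↔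
      t ∈ acc ∨ ∃ kv ∈ pvKeywords, kv.1.isPrefixOf (low.drop i) = true ∧ kv.2 = t := by
  have gen : ∀ (l : List (List Char × String)) (a : PySem.Set String),
      t ∈ l.foldl (fun a kv => if kv.1.isPrefixOf (low.drop i) then PySem.Set.add a kv.2 else a) a ↔
        t ∈ a ∨ ∃ kv ∈ l, kv.1.isPrefixOf (low.drop i) = true ∧ kv.2 = t := by
    intro l
    induction l with
    | nil => simp
    | cons kv l ih =>
        intro a
        simp only [List.foldl_cons, List.mem_cons]
        rw [ih]
        by_cases h : kv.1.isPrefixOf (low.drop i) = true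
        · rw [if_pos h, PySem.Set.mem_add]
          constructor
          · rintro ((ha | rfl) | ⟨kv', hkv', hp, ht⟩)
            · exact Or.inl ha
            · exact Or.inr ⟨kv, Or.inl rfl, h, rfl⟩
            · exact Or.inr ⟨kv', Or.inr hkv', hp, ht⟩
          · rintro (ha | ⟨kv', (rfl | hkv'), hp, ht⟩)
            · exact Or.inl (Or.inl ha)
            · exact Or.inl (Or.inr ht.symm)
            · exact Or.inr ⟨kv', hkv', hp, ht⟩
        · rw [if_neg h]
          simp only [Bool.not_eq_true] at h
          constructor
          · rintro (ha | ⟨kv', hkv', hp, ht⟩)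
            · exact Or.inl ha
            · exact Or.inr ⟨kv', Or.inr hkv', hp, ht⟩
          · rintro (ha | ⟨kv', (rfl | hkv'), hp, ht⟩)
            · exact Or.inl ha
            · rw [h] at hp; cases hp
            · exact Or.inr ⟨kv', hkv', hp, ht⟩
  exact gen pvKeywords acc

-- membership after the outer position loop
theorem pv_mem_scan (low : List Char) (l : List Nat) (acc : PySem.Set String) (t : String) :
    t ∈ l.foldl (pvScanPos low) acc ↔
      t ∈ acc ∨ ∃ i ∈ l, ∃ kv ∈ pvKeywords, kv.1.isPrefixOf (low.drop i) = true ∧ kv.2 = t := by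
  induction l generalizing acc with
  | nil => simp
  | cons i l ih =>
      simp only [List.foldl_cons, List.mem_cons]
      rw [ih, pv_mem_scanPos]
      constructor
      · rintro ((ha | ⟨kv, hkv, hp, ht⟩) | ⟨j, hj, hrest⟩)
        · exact Or.inl ha
        · exact Or.inr ⟨i, Or.inl rfl, kv, hkv, hp, ht⟩
        · exact Or.inr ⟨j, Or.inr hj, hrest⟩
      · rintro (ha | ⟨j, (rfl | hj), hrest⟩)
        · exact Or.inl (Or.inl ha)
        · exact Or.inl (Or.inr hrest)
        · exact Or.inr ⟨j, hj, hrest⟩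

-- a nonempty keyword occurs at some position < length iff it occurs at all
theorem pv_bounded_prefix (kw s : List Char) (hkw : kw ≠ []) :
    (∃ i < s.length, kw.isPrefixOf (s.drop i) = true) ↔ PySem.Chars.isIn kw s = true := by
  rw [← PySem.Chars.exists_prefix_drop_iff_isIn]
  constructor
  · rintro ⟨i, _, hp⟩
    exact ⟨i, List.isPrefixOf_iff_prefix.mp hp⟩
  · rintro ⟨j, hp⟩
    by_cases hj : j < s.length
    · exact ⟨j, hj, List.isPrefixOf_iff_prefix.mpr hp⟩
    · exfalso
      rw [List.drop_eq_nil_of_le (by omega)] at hp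
      exact hkw (List.prefix_nil.mp hp)

-- the set built by B contains a tag iff some of its keywords occurs in low
theorem pv_found_iff (low : List Char) (t : String) :
    (PySem.Set.contains ((List.range low.length).foldl (pvScanPos low) PySem.Set.empty) t = true) ↔
      ∃ kv ∈ pvKeywords, kv.2 = t ∧ PySem.Chars.isIn kv.1 low = true := by
  rw [PySem.Set.contains_iff, pv_mem_scan]
  simp only [PySem.Set.empty, List.not_mem_nil, false_or, List.mem_range]
  constructor
  · rintro ⟨i, hi, kv, hkv, hp, ht⟩
    refine ⟨kv, hkv, ht, ?_⟩
    have hne : kv.1 ≠ [] := by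
      revert hkv; unfold pvKeywords; intro hkv
      fin_cases hkv <;> decide
    exact (pv_bounded_prefix kv.1 low hne).mp ⟨i, hi, hp⟩
  · rintro ⟨kv, hkv, ht, hin⟩
    have hne : kv.1 ≠ [] := by
      revert hkv; unfold pvKeywords; intro hkv
      fin_cases hkv <;> decide
    obtain ⟨i, hi, hp⟩ := (pv_bounded_prefix kv.1 low hne).mpr hin
    exact ⟨i, hi, kv, hkv, hp, ht⟩

theorem pv_isIn_toList (w s : String) :
    PySem.Str.isIn w s = PySem.Chars.isIn w.toList s.toList := by
  by_cases h : PySem.Str.isIn w s = true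
  · rw [h]
    exact ((PySem.Chars.isIn_iff_infix _ _).mpr ((PySem.Str.isIn_iff_infix _ _).mp h)).symm
  · simp only [Bool.not_eq_true] at h
    rw [h]
    symm
    rw [← Bool.not_eq_true, PySem.Chars.isIn_iff_infix]
    rw [← Bool.not_eq_true, PySem.Str.isIn_iff_infix] at h
    exact h

-- ===== VERDICT =====
theorem extract_special_requirements_py_spec : Claim_equal_extract_special_requirements_py := by
  intro text _
  unfold Spec_extract_special_requirements_py extract_special_requirements_py
    extract_special_requirements_py_alt
  simp only []
  set low := (PySem.Str.lower text).toList with hlow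
  have hfilter : ∀ t ∈ pvTagOrder,
      (PySem.Set.contains ((List.range low.length).foldl (pvScanPos low) PySem.Set.empty) t) =
        (pvKeywords.filter (fun kv => kv.2 == t)).any (fun kv => PySem.Chars.isIn kv.1 low) := by
    intro t _
    by_cases h : (PySem.Set.contains ((List.range low.length).foldl (pvScanPos low) PySem.Set.empty) t) = true
    · rw [h]
      obtain ⟨kv, hkv, ht, hin⟩ := (pv_found_iff low t).mp h
      symm
      rw [List.any_eq_true]
      exact ⟨kv, List.mem_filter.mpr ⟨hkv, by simp [ht]⟩, hin⟩
    · simp only [Bool.not_eq_true] at h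
      rw [h]
      symm
      rw [← Bool.not_eq_true, List.any_eq_true]
      rintro ⟨kv, hkv, hin⟩
      obtain ⟨hkv1, hkv2⟩ := List.mem_filter.mp hkv
      have : (PySem.Set.contains ((List.range low.length).foldl (pvScanPos low) PySem.Set.empty) t) = true :=
        (pv_found_iff low t).mpr ⟨kv, hkv1, by simpa using hkv2, hin⟩
      rw [h] at this; cases this
  -- reduce both sides to the three booleans b1 b2 b3
  have e1 : (["accessible", "wheelchair", "disability"].any
      (fun word => PySem.Str.isIn word (PySem.Str.lower text))) =
      (PySem.Set.contains ((List.range low.length).foldl (pvScanPos low) PySem.Set.empty)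
        "accessibility_compliant") := by
    rw [hfilter "accessibility_compliant" (by decide)]
    simp only [pvKeywords, List.filter, List.any, pv_isIn_toList]
    rfl
  have e2 : (["professional", "chef", "commercial"].any
      (fun word => PySem.Str.isIn word (PySem.Str.lower text))) =
      (PySem.Set.contains ((List.range low.length).foldl (pvScanPos low) PySem.Set.empty)
        "professional_grade") := by
    rw [hfilter "professional_grade" (by decide)]
    simp only [pvKeywords, List.filter, List.any, pv_isIn_toList]
    rfl
  have e3 : (["entertaining", "party", "guests"].any
      (fun word => PySem.Str.isIn word (PySem.Str.lower text))) =
      (PySem.Set.contains ((List.range low.length).foldl (pvScanPos low) PySem.Set.empty)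
        "entertainment_focused") := by
    rw [hfilter "entertainment_focused" (by decide)]
    simp only [pvKeywords, List.filter, List.any, pv_isIn_toList]
    rfl
  rw [e1, e2, e3]
  unfold pvTagOrder
  simp only [List.filter]
  generalize (PySem.Set.contains _ "accessibility_compliant") = b1
  generalize (PySem.Set.contains _ "professional_grade") = b2
  generalize (PySem.Set.contains _ "entertainment_focused") = b3
  cases b1 <;> cases b2 <;> cases b3 <;> rfl
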